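-- pv_equiv track=rewrite | github.com/cobaltt7/python-exercises | 8 List/133-135.py | one_three_three
-- ===== SOURCE A (Python) =====
-- from typing import Any
--
-- def one_three_three(one: list[Any], two: list[Any]):
--     """
--     Write a Python program to check if two lists have the same elements in them in same order or
--     not.
--     """
--     index = -1
--     for item in one:
--         if item not in two:
--             continue
--
--         found = two.index(item)
--         if found < index:
--             return False
--         index = found
--     return True
-- ===== SOURCE B (Python) =====
-- def one_three_three(one, two):
--     positions = {x: i for i, x in reversed(list(enumerate(two)))}
--     idxs = [positions[x] for x in one if x in positions]
--     return idxs == sorted(idxs)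
-- ===== Notes on version B (the rewrite author's own statement) =====
-- stated objective: faster
-- what changed: B is staged instead of stateful: it builds a first-occurrence-index dict in one backward pass over two, collects the index list of one's matched elements, and decides the answer by comparing that list with its sorted copy, replacing A's single accumulator loop with repeated 'in'/.index linear scans of two.
import Mathlib
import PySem

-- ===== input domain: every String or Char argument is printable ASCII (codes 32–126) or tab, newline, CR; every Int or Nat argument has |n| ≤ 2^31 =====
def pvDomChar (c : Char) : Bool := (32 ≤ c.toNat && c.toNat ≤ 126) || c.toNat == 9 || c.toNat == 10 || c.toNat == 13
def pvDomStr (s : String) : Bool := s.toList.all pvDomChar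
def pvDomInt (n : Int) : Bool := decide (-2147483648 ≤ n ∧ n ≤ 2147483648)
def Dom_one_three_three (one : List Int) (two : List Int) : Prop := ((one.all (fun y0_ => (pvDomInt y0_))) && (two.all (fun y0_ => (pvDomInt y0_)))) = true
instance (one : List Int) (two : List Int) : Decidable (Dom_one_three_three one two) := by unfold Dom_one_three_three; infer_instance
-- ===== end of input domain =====

-- B builds a dict of first-occurrence indices by one backward pass over `two`,
-- collects the index list for `one` and compares it to its sorted copy, instead
-- of A's stateful scan with repeated `in`/.index searches; objective: faster.


-- ===== PORT A =====
-- the for-loop over `one` with state `index`; early `return False` = result false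
def oneA_loop (two : List Int) : List Int → Int → Bool
  | [], _ => true
  | item :: rest, index =>
    if !(two.contains item) then
      oneA_loop two rest index                      -- continue
    else
      match PySem.List.index? two item with
      | some found =>
          if (found : Int) < index then false else oneA_loop two rest (found : Int)
      | none => true                                -- unreachable: guarded by membership

def one_three_three (one : List Int) (two : List Int) : Bool :=
  oneA_loop two one (-1)

-- ===== PORT B =====
-- positions = {x: i for i, x in reversed(list(enumerate(two)))}  (last write wins = first occurrence)
def altPositions (two : List Int) : PySem.Dict Int Int :=
  (PySem.List.enumerate two 0).reverse.foldl (fun d p => d.insert p.2 p.1) PySem.Dict.empty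

-- idxs = [positions[x] for x in one if x in positions]
def one_three_three_alt (one : List Int) (two : List Int) : Bool :=
  let positions := altPositions two
  let idxs := one.filterMap (fun x => positions.get? x)
  decide (idxs = PySem.List.sorted idxs (fun x => x) false)

-- ===== PRECONDITION & SPEC =====
def Spec_one_three_three (one : List Int) (two : List Int) (out : Bool) : Prop := out = one_three_three_alt one two
instance (one : List Int) (two : List Int) (out : Bool) : Decidable (Spec_one_three_three one two out) := by unfold Spec_one_three_three; infer_instance

-- ===== CLAIM (what is proved, stated in full; the proofs are below) =====
def Claim_equal_one_three_three : Prop := ∀ (one : List Int) (two : List Int), Dom_one_three_three one two → Spec_one_three_three one two (one_three_three one two)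

-- ===== LEMMAS AND PROOFS =====

-- the backward-pass dict looks up the first-occurrence index
theorem get?_pos_fold (two : List Int) (s : Int) (d : PySem.Dict Int Int) (x : Int) :
    ((PySem.List.enumerate two s).reverse.foldl (fun d p => d.insert p.2 p.1) d).get? x =
    match PySem.List.index? two x with
    | some k => some (s + (k : Int))
    | none => d.get? x := by
  induction two generalizing s d with
  | nil => simp [PySem.List.enumerate_nil, PySem.List.index?_eq_idxOf?]
  | cons y ys ih =>
    rw [PySem.List.enumerate_cons]
    simp only [List.reverse_cons, List.foldl_append, List.foldl_cons, List.foldl_nil]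
    by_cases hxy : x = y
    · subst hxy
      have hself := PySem.List.index?_cons_self x ys
      rw [hself, PySem.Dict.get?_insert_self]
      simp
    · have hne : y ≠ x := fun h => hxy h.symm
      rw [PySem.List.index?_cons_of_ne ys hne,
          PySem.Dict.get?_insert_of_ne _ s hxy, ih]
      cases h : PySem.List.index? ys x with
      | none => simp
      | some k => simp; omega

theorem get?_altPositions (two : List Int) (x : Int) :
    (altPositions two).get? x = (PySem.List.index? two x).map (fun k => (k : Int)) := by
  unfold altPositions
  rw [get?_pos_fold]
  cases h : PySem.List.index? two x <;> simp

-- A's loop, abstracted over the list of looked-up indices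
def chk : Int → List Int → Bool
  | _, [] => true
  | prev, j :: rest => if j < prev then false else chk j rest

theorem oneA_loop_eq_chk (two : List Int) (one : List Int) (index : Int) :
    oneA_loop two one index =
      chk index (one.filterMap (fun x => (PySem.List.index? two x).map (fun k => (k : Int)))) := by
  induction one generalizing index with
  | nil => rfl
  | cons item rest ih =>
    simp only [oneA_loop, List.filterMap_cons]
    by_cases hm : item ∈ two
    · have hc : two.contains item = true := by simpa using hm
      obtain ⟨k, hk⟩ := Option.isSome_iff_exists.mp
        ((PySem.List.index?_isSome_iff (xs := two) (v := item)).mpr hm)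
      rw [hc, hk]
      by_cases hlt : (k : Int) < index
      · simp [chk, hlt]
      · simp [chk, hlt, ih]
    · have hc : two.contains item = false := by simpa using hm
      have hn : PySem.List.index? two item = none :=
        (PySem.List.index?_eq_none_iff _ _).mpr hm
      rw [hc, hn]
      simp [ih]

theorem chk_iff_chain (l : List Int) (prev : Int) :
    chk prev l = true ↔ List.IsChain (· ≤ ·) (prev :: l) := by
  induction l generalizing prev with
  | nil => simp [chk]
  | cons j rest ih =>
    rw [List.isChain_cons_cons]
    simp only [chk]
    by_cases h : j < prev
    · rw [if_pos h]
      simp only [Bool.false_eq_true, false_iff]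
      intro hch
      exact absurd hch.1 (by omega)
    · rw [if_neg h, ih]
      constructor
      · intro hr; exact ⟨by omega, hr⟩
      · rintro ⟨-, hr⟩; exact hr

theorem chk_neg_one (l : List Int) (hnn : ∀ x ∈ l, 0 ≤ x) :
    chk (-1) l = decide (l = PySem.List.sorted l (fun x => x) false) := by
  rw [Bool.eq_iff_iff, chk_iff_chain, decide_eq_true_iff]
  constructor
  · intro h
    have hp : l.Pairwise (· ≤ ·) := by
      cases l with
      | nil => simp
      | cons j rest =>
        rw [List.isChain_cons_cons] at h
        exact (List.IsChain.pairwise h.2)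
    exact (PySem.List.sorted_eq_self_of_pairwise l (fun x : Int => x) hp).symm
  · intro h
    have hp : l.Pairwise (· ≤ ·) := by
      have := PySem.List.sorted_pairwise (xs := l) (key := fun x : Int => x)
      rw [← h] at this
      exact this
    cases l with
    | nil => simp
    | cons j rest =>
      rw [List.isChain_cons_cons]
      refine ⟨by have := hnn j (by simp); omega, hp.isChain⟩

-- ===== VERDICT (by name: the statement is the Claim_ definition above) =====
theorem one_three_three_spec : Claim_equal_one_three_three := by
  intro one two _
  unfold Spec_one_three_three one_three_three one_three_three_alt
  rw [oneA_loop_eq_chk]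
  have hfm : one.filterMap (fun x => (altPositions two).get? x) =
      one.filterMap (fun x => (PySem.List.index? two x).map (fun k => (k : Int))) :=
    List.filterMap_congr (fun x _ => get?_altPositions two x)
  simp only [hfm]
  apply chk_neg_one
  intro x hx
  obtain ⟨y, -, hy⟩ := List.mem_filterMap.mp hx
  cases h : PySem.List.index? two y with
  | none => rw [h] at hy; simp at hy
  | some k => rw [h] at hy; simp at hy; omega
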